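-- pv_equiv track=rewrite | github.com/miczho/competitive-coding | src/codejam-22-qa.py | punchedCards
-- ===== SOURCE A (Python) =====
-- def punchedCards(r, c):
--     res = []
--
--     res.append('..+' + ('-+' * (c-1)))
--     res.append('..|' + ('.|' * (c-1)))
--
--     for i in range((r-1)*2+1):
--         if i % 2 == 0:
--             res.append('+-+' + ('-+' * (c-1)))
--         else:
--             res.append('|.|' + ('.|' * (c-1)))
--
--     return res
-- ===== SOURCE B (Python) =====
-- def punchedCards(r, c):
--     rows = 2 + max(0, (r - 1) * 2 + 1)
--     width = 3 + 2 * max(0, c - 1)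
--
--     def cell(j, k):
--         if j < 2 and k < 2:
--             return '.'
--         if j % 2 == 0:
--             return '+' if k % 2 == 0 else '-'
--         return '|' if k % 2 == 0 else '.'
--
--     kinds = [''.join(cell(j, k) for k in range(width)) for j in range(min(rows, 4))]
--     return [kinds[j if j < 2 else 2 + j % 2] for j in range(rows)]
-- ===== Notes on version B (the rewrite author's own statement) =====
-- stated objective: alternative
-- what changed: B computes each of the at most four distinct row kinds once, character by character from a closed-form (row, column) cell function (punched corner = both coordinates < 2), and shares those strings across all rows, instead of A's per-row string-repetition and concatenation appends.
import Mathlib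
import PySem

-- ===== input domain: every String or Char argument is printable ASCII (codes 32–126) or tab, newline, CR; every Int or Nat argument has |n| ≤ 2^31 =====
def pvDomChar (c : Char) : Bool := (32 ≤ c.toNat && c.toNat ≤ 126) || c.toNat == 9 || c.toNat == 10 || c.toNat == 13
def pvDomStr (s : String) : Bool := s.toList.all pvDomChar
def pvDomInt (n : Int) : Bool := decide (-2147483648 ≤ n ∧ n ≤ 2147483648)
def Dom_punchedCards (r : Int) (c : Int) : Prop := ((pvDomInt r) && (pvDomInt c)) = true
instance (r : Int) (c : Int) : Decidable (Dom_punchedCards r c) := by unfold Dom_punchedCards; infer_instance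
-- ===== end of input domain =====

-- B computes each of the at most four distinct row kinds once, character by character
-- from a closed-form (row, column) cell function, and shares them across all rows,
-- instead of A's per-row string-repetition appends (objective: alternative algorithm; row strings are shared).

-- ===== PORT A =====
-- 's * n' on a Python string, over its characters (exact: Python string repetition)
def pvStrMul (l : List Char) (n : Int) : List Char := PySem.List.pyRepeat l n

def punchedCards (r : Int) (c : Int) : List String :=
  let res : List String := []
  let res := res ++ [String.ofList (['.', '.', '+'] ++ pvStrMul ['-', '+'] (c - 1))]
  let res := res ++ [String.ofList (['.', '.', '|'] ++ pvStrMul ['.', '|'] (c - 1))]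
  (PySem.List.pyRange 0 ((r - 1) * 2 + 1) 1).foldl (fun res i =>
    if PySem.Int.mod i 2 == 0 then
      res ++ [String.ofList (['+', '-', '+'] ++ pvStrMul ['-', '+'] (c - 1))]
    else
      res ++ [String.ofList (['|', '.', '|'] ++ pvStrMul ['.', '|'] (c - 1))]) res

-- ===== PORT B =====
-- the cell function of Source B: character at row j, column k of the card grid
def pcCell (j : Nat) (k : Nat) : Char :=
  if j < 2 && k < 2 then '.'
  else if j % 2 == 0 then (if k % 2 == 0 then '+' else '-')
  else (if k % 2 == 0 then '|' else '.')

def punchedCards_alt (r : Int) (c : Int) : List String :=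
  let rows : Int := 2 + max 0 ((r - 1) * 2 + 1)
  let width : Int := 3 + 2 * max 0 (c - 1)
  let kinds : List String := (List.range (min rows.toNat 4)).map (fun j =>
    String.ofList ((List.range width.toNat).map (fun k => pcCell j k)))
  -- kinds[idx]: idx is always in range, so getD is exact here
  (List.range rows.toNat).map (fun j =>
    kinds.getD (if j < 2 then j else 2 + j % 2) "")

-- ===== PRECONDITION & SPEC =====
def Spec_punchedCards (r : Int) (c : Int) (out : List String) : Prop := out = punchedCards_alt r c
instance (r : Int) (c : Int) (out : List String) : Decidable (Spec_punchedCards r c out) := by unfold Spec_punchedCards; infer_instance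

-- ===== CLAIM (what is proved, stated in full; the proofs are below) =====
def Claim_equal_punchedCards : Prop := ∀ (r : Int) (c : Int), Dom_punchedCards r c → Spec_punchedCards r c (punchedCards r c)

-- ===== LEMMAS AND PROOFS =====

-- A's loop body, with the branch pushed inside the appended singleton
theorem foldl_if_append {α : Type} (l : List Int) (p : Int → Bool) (u v : α)
    (init : List α) :
    l.foldl (fun res i => if p i then res ++ [u] else res ++ [v]) init
      = init ++ l.map (fun i => if p i then u else v) := by
  rw [show (fun (res : List α) i => if p i then res ++ [u] else res ++ [v])
      = (fun res i => res ++ [if p i then u else v]) from by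
    funext res i; split <;> rfl]
  exact PySem.List.foldl_append_singleton_eq_map _ _ _

-- an even-length alternating run is the flattening of a replicated pair
theorem alt_run (m : Nat) (a b : Char) :
    (List.range (2 * m)).map (fun k => if k % 2 == 0 then a else b)
      = (List.replicate m ([a, b] : List Char)).flatten := by
  induction m with
  | zero => rfl
  | succ n ih =>
    rw [show 2 * (n + 1) = (2 * n + 1) + 1 from by omega, List.range_succ, List.range_succ,
      List.map_append, List.map_append, ih, List.replicate_succ', List.flatten_append]
    simp [Nat.add_mod, Nat.mul_mod_right]

-- any row whose tail alternates a,b from column 3 on is front ++ replicated pairs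
theorem row_shape (m : Nat) (f : Nat → Char) (a b : Char)
    (h : ∀ k : Nat, f (3 + k) = if k % 2 == 0 then a else b) :
    (List.range (3 + 2 * m)).map f
      = [f 0, f 1, f 2] ++ (List.replicate m ([a, b] : List Char)).flatten := by
  rw [List.range_add, List.map_append, List.map_map]
  refine congrArg₂ _ rfl ?_
  simp only [Function.comp_def]
  rw [List.map_congr_left (fun k _ => h k)]
  exact alt_run m a b

theorem row_even (j m : Nat) (hj : j % 2 = 0) (hj2 : 2 ≤ j) :
    (List.range (3 + 2 * m)).map (pcCell j)
      = ['+', '-', '+'] ++ (List.replicate m (['-', '+'] : List Char)).flatten := by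
  have hlt : ¬ j < 2 := by omega
  have h := row_shape m (pcCell j) '-' '+' (fun k => by
    rcases Nat.even_or_odd k with hk | hk
    · have h0 : k % 2 = 0 := Nat.even_iff.mp hk
      have h3 : (3 + k) % 2 = 1 := by omega
      simp [pcCell, hlt, hj, h0, h3]
    · have h0 : k % 2 = 1 := Nat.odd_iff.mp hk
      have h3 : (3 + k) % 2 = 0 := by omega
      simp [pcCell, hlt, hj, h0, h3])
  rw [h]
  simp [pcCell, hlt, hj]

theorem row_odd (j m : Nat) (hj : j % 2 = 1) (hj2 : 2 ≤ j) :
    (List.range (3 + 2 * m)).map (pcCell j)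
      = ['|', '.', '|'] ++ (List.replicate m (['.', '|'] : List Char)).flatten := by
  have hlt : ¬ j < 2 := by omega
  have hj0 : ¬ (j % 2 = 0) := by omega
  have h := row_shape m (pcCell j) '.' '|' (fun k => by
    rcases Nat.even_or_odd k with hk | hk
    · have h0 : k % 2 = 0 := Nat.even_iff.mp hk
      have h3 : (3 + k) % 2 = 1 := by omega
      simp [pcCell, hlt, hj0, h0, h3]
    · have h0 : k % 2 = 1 := Nat.odd_iff.mp hk
      have h3 : (3 + k) % 2 = 0 := by omega
      simp [pcCell, hlt, hj0, h0, h3])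
  rw [h]
  simp [pcCell, hlt, hj0]

theorem row_zero (m : Nat) :
    (List.range (3 + 2 * m)).map (pcCell 0)
      = ['.', '.', '+'] ++ (List.replicate m (['-', '+'] : List Char)).flatten := by
  have h := row_shape m (pcCell 0) '-' '+' (fun k => by
    have hnp : ¬ (3 + k) < 2 := by omega
    rcases Nat.even_or_odd k with hk | hk
    · have h0 : k % 2 = 0 := Nat.even_iff.mp hk
      have h3 : (3 + k) % 2 = 1 := by omega
      simp [pcCell, hnp, h0, h3]
    · have h0 : k % 2 = 1 := Nat.odd_iff.mp hk
      have h3 : (3 + k) % 2 = 0 := by omega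
      simp [pcCell, hnp, h0, h3])
  rw [h]; rfl

theorem row_one (m : Nat) :
    (List.range (3 + 2 * m)).map (pcCell 1)
      = ['.', '.', '|'] ++ (List.replicate m (['.', '|'] : List Char)).flatten := by
  have h := row_shape m (pcCell 1) '.' '|' (fun k => by
    have hnp : ¬ (3 + k) < 2 := by omega
    rcases Nat.even_or_odd k with hk | hk
    · have h0 : k % 2 = 0 := Nat.even_iff.mp hk
      have h3 : (3 + k) % 2 = 1 := by omega
      simp [pcCell, hnp, h0, h3]
    · have h0 : k % 2 = 1 := Nat.odd_iff.mp hk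
      have h3 : (3 + k) % 2 = 0 := by omega
      simp [pcCell, hnp, h0, h3])
  rw [h]; rfl

theorem getD_map_range (f : Nat → String) (n i : Nat) (d : String) (h : i < n) :
    (List.map f (List.range n)).getD i d = f i := by
  rw [List.getD_eq_getElem?_getD, List.getElem?_map, List.getElem?_range h]
  rfl

theorem punchedCards_eq (r : Int) (c : Int) :
    punchedCards r c = punchedCards_alt r c := by
  unfold punchedCards punchedCards_alt pvStrMul
  dsimp only
  rw [foldl_if_append, PySem.List.pyRange_one]
  simp only [List.nil_append]
  have hw : (3 + 2 * max 0 (c - 1)).toNat = 3 + 2 * (c - 1).toNat := by omega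
  have hrows : (2 + max 0 ((r - 1) * 2 + 1)).toNat
      = 2 + ((r - 1) * 2 + 1 - 0).toNat := by omega
  have hrep : ∀ l : List Char, PySem.List.pyRepeat l (c - 1)
      = (List.replicate (c - 1).toNat l).flatten := fun l => rfl
  rw [hw, hrows]
  rw [show List.range (2 + ((r - 1) * 2 + 1 - 0).toNat)
      = List.range 2 ++ (List.range ((r - 1) * 2 + 1 - 0).toNat).map (fun x => 2 + x)
    from List.range_add]
  rw [List.map_append, List.map_map]
  rw [show List.range 2 = [0, 1] from rfl]
  simp only [List.map_cons, List.map_nil, List.cons_append, List.nil_append, List.map_map]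
  rw [if_pos (by omega : (0 : Nat) < 2), if_pos (by omega : (1 : Nat) < 2)]
  rw [getD_map_range _ _ 0 _ (by omega), getD_map_range _ _ 1 _ (by omega), row_zero, row_one]
  simp only [hrep]
  refine congrArg₂ _ rfl (congrArg₂ _ rfl ?_)
  apply List.map_congr_left
  intro k hk
  have hkM : k < ((r - 1) * 2 + 1 - 0).toNat := List.mem_range.mp hk
  have hmod : PySem.Int.mod (0 + (k : Int)) 2 = ((k % 2 : Nat) : Int) := by
    rw [Int.zero_add]; exact_mod_cast PySem.Int.mod_natCast k 2
  have hnlt : ¬ (2 + k < 2) := by omega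
  rcases Nat.even_or_odd k with hkp | hkp
  · have h0 : k % 2 = 0 := Nat.even_iff.mp hkp
    have h2 : (2 + k) % 2 = 0 := by omega
    simp only [Function.comp, hmod, h0, Nat.cast_zero, beq_self_eq_true, if_true,
      if_neg hnlt, h2]
    rw [getD_map_range _ _ (2 + 0) _ (by omega), row_even (2 + 0) _ (by omega) (by omega)]
    rfl
  · have h0 : k % 2 = 1 := Nat.odd_iff.mp hkp
    have h2 : (2 + k) % 2 = 1 := by omega
    simp only [Function.comp, hmod, h0, Nat.cast_one,
      if_neg (by decide : ¬((1 : Int) == 0) = true), if_neg hnlt, h2]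
    rw [getD_map_range _ _ (2 + 1) _ (by omega), row_odd (2 + 1) _ (by omega) (by omega)]
    rfl

-- ===== VERDICT (by name: the statement is the Claim_ definition above) =====
theorem punchedCards_spec : Claim_equal_punchedCards := by
  intro r c _
  unfold Spec_punchedCards
  exact punchedCards_eq r c
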